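-- pv_equiv track=rewrite | github.com/s3c/Misc | Python/hzanalize.py | calcfactors
-- ===== SOURCE A (Python) =====
-- from collections import defaultdict
--
-- def calcfactors(repts):
--   ffactors = defaultdict(int)
--   for loopvar1 in range(len(repts)-1):
--     for loopvar2 in range(loopvar1+1, len(repts)):
--       repspc = repts[loopvar2]-repts[loopvar1]
--       for loopvar3 in range(2, repspc+1):
--         if(repspc % loopvar3 == 0):
--           ffactors[loopvar3] += 1
--   return dict(ffactors)
-- ===== SOURCE B (Python) =====
-- def calcfactors(repts):
--     # Tally each positive pairwise difference once, then enumerate the factors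
--     # of each DISTINCT difference a single time, weighted by its frequency.
--     diffcount = {}
--     for i, x in enumerate(repts):
--         for y in repts[i + 1:]:
--             d = y - x
--             if d >= 2:
--                 diffcount[d] = diffcount.get(d, 0) + 1
--     ffactors = {}
--     for d, c in diffcount.items():
--         for f in range(2, d + 1):
--             if d % f == 0:
--                 ffactors[f] = ffactors.get(f, 0) + c
--     return ffactors
-- ===== Notes on version B (the rewrite author's own statement) =====
-- stated objective: faster
-- what changed: B tallies the pairwise differences into a frequency dict in one O(n^2) pass and then enumerates the factors of each DISTINCT difference exactly once, adding its frequency, instead of re-running the full 2..d divisor scan for every pair as A does.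
import Mathlib
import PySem

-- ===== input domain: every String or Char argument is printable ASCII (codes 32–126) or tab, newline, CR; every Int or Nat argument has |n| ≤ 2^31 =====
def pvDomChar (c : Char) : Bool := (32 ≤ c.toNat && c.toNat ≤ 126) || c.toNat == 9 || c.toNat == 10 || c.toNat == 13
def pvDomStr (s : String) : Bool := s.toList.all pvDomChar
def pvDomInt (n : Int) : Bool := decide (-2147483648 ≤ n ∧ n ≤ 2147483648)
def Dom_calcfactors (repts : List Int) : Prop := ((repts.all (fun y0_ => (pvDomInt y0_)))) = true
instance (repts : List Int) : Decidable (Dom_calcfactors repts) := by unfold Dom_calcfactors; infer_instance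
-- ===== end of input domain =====

-- B tallies each pairwise difference once and enumerates the divisors of each
-- DISTINCT difference a single time, weighted by its frequency (objective: faster).

-- ===== PORT A =====
def calcfactors (repts : List Int) : List (Int × Int) :=
  let ff : PySem.Dict Int Int :=
    (PySem.List.pyRange 0 (PySem.List.len repts - 1)).foldl (fun ff i =>
      (PySem.List.pyRange (i + 1) (PySem.List.len repts)).foldl (fun ff j =>
        let repspc := PySem.List.pyGetD repts j 0 - PySem.List.pyGetD repts i 0
        (PySem.List.pyRange 2 (repspc + 1)).foldl (fun ff f =>
          if PySem.Int.mod repspc f == 0 then ff.modify f 0 (· + 1) else ff) ff) ff)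
      PySem.Dict.empty
  ff.items

-- ===== PORT B =====
def calcfactors_alt (repts : List Int) : List (Int × Int) :=
  let diffcount : PySem.Dict Int Int :=
    (PySem.List.enumerate repts).foldl (fun dc p =>
      (PySem.List.slice repts (some (p.1 + 1))).foldl (fun dc y =>
        let d := y - p.2
        if 2 ≤ d then dc.insert d (dc.getD d 0 + 1) else dc) dc)
      PySem.Dict.empty
  let ffactors : PySem.Dict Int Int :=
    diffcount.items.foldl (fun ff p =>
      (PySem.List.pyRange 2 (p.1 + 1)).foldl (fun ff f =>
        if PySem.Int.mod p.1 f == 0 then ff.insert f (ff.getD f 0 + p.2) else ff) ff)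
      PySem.Dict.empty
  ffactors.items

-- ===== PRECONDITION & SPEC =====
def Spec_calcfactors (repts : List Int) (out : List (Int × Int)) : Prop := out = calcfactors_alt repts
instance (repts : List Int) (out : List (Int × Int)) : Decidable (Spec_calcfactors repts out) := by unfold Spec_calcfactors; infer_instance

-- ===== CLAIM (what is proved, stated in full; the proofs are below) =====
def Claim_equal_calcfactors : Prop := ∀ (repts : List Int), Dom_calcfactors repts → Spec_calcfactors repts (calcfactors repts)

-- ===== LEMMAS AND PROOFS =====

-- `bump` of one key by one amount; both inner loops are folds of bumps.
def pvBump (X : PySem.Dict Int Int) (p : Int × Int) : PySem.Dict Int Int :=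
  X.insert p.1 (X.getD p.1 0 + p.2)

def pvBumps (bs : List (Int × Int)) (X : PySem.Dict Int Int) : PySem.Dict Int Int :=
  bs.foldl pvBump X

-- factors 2..d of d, in ascending order
def pvFacs (d : Int) : List Int :=
  (PySem.List.pyRange 2 (d + 1)).filter (fun f => PySem.Int.mod d f == 0)

-- A's per-difference step: bump every factor by 1
def pvStep1 (X : PySem.Dict Int Int) (d : Int) : PySem.Dict Int Int :=
  pvBumps ((pvFacs d).map (fun f => (f, (1 : Int)))) X

-- B's per-counter-item step: bump every factor of p.1 by the count p.2
def pvStep2 (X : PySem.Dict Int Int) (p : Int × Int) : PySem.Dict Int Int :=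
  pvBumps ((pvFacs p.1).map (fun f => (f, p.2))) X

-- B's counting step over one difference
def pvCStep (dc : PySem.Dict Int Int) (d : Int) : PySem.Dict Int Int :=
  if 2 ≤ d then dc.insert d (dc.getD d 0 + 1) else dc

-- the sequence of differences repts[j]-repts[i] (i < j) in the pair order both loops use
def pvDiffs : List Int → List Int
  | [] => []
  | x :: xs => xs.map (· - x) ++ pvDiffs xs

-- A's / B's conditional inner loops are bump folds over the filtered factor list
theorem pv_stepA_gen (d : Int) : ∀ (l : List Int) (ff : PySem.Dict Int Int),
    l.foldl (fun ff f => if PySem.Int.mod d f == 0 then ff.modify f 0 (· + 1) else ff) ff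
      = pvBumps ((l.filter (fun f => PySem.Int.mod d f == 0)).map (fun f => (f, (1 : Int)))) ff := by
  intro l
  induction l with
  | nil => intro ff; rfl
  | cons a l ih =>
    intro ff
    by_cases h : PySem.Int.mod d a == 0
    · simp only [List.foldl_cons, List.filter_cons, h, if_pos, List.map_cons]
      rw [ih]
      rfl
    · simp only [Bool.not_eq_true] at h
      simp only [List.foldl_cons, List.filter_cons, h, Bool.false_eq_true, if_false]
      rw [ih]

theorem pv_stepA_eq (ff : PySem.Dict Int Int) (d : Int) :
    (PySem.List.pyRange 2 (d + 1)).foldl (fun ff f =>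
      if PySem.Int.mod d f == 0 then ff.modify f 0 (· + 1) else ff) ff = pvStep1 ff d :=
  pv_stepA_gen d _ ff

theorem pv_stepB_gen (d c : Int) : ∀ (l : List Int) (ff : PySem.Dict Int Int),
    l.foldl (fun ff f => if PySem.Int.mod d f == 0 then ff.insert f (ff.getD f 0 + c) else ff) ff
      = pvBumps ((l.filter (fun f => PySem.Int.mod d f == 0)).map (fun f => (f, c))) ff := by
  intro l
  induction l with
  | nil => intro ff; rfl
  | cons a l ih =>
    intro ff
    by_cases h : PySem.Int.mod d a == 0
    · simp only [List.foldl_cons, List.filter_cons, h, if_pos, List.map_cons]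
      rw [ih]
      rfl
    · simp only [Bool.not_eq_true] at h
      simp only [List.foldl_cons, List.filter_cons, h, Bool.false_eq_true, if_false]
      rw [ih]

theorem pv_stepB_eq (ff : PySem.Dict Int Int) (p : Int × Int) :
    (PySem.List.pyRange 2 (p.1 + 1)).foldl (fun ff f =>
      if PySem.Int.mod p.1 f == 0 then ff.insert f (ff.getD f 0 + p.2) else ff) ff = pvStep2 ff p :=
  pv_stepB_gen p.1 p.2 _ ff

theorem pvFacs_nil {d : Int} (h : d < 2) : pvFacs d = [] := by
  unfold pvFacs
  rw [PySem.List.pyRange_one_eq_nil (by omega)]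
  rfl

theorem pvStep1_of_lt {d : Int} (X : PySem.Dict Int Int) (h : d < 2) : pvStep1 X d = X := by
  unfold pvStep1
  rw [pvFacs_nil h]
  rfl

theorem pvDiffs_short {l : List Int} (h : l.length ≤ 1) : pvDiffs l = [] := by
  match l with
  | [] => rfl
  | [x] => rfl
  | x :: y :: t => simp at h

-- key-membership is preserved by a bump
theorem pv_mem_keys_bump {k : Int} {X : PySem.Dict Int Int} (q : Int × Int)
    (h : k ∈ X.keys) : k ∈ (pvBump X q).keys := by
  unfold pvBump
  rw [PySem.Dict.mem_keys_insert]
  exact Or.inr h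

theorem pv_mem_keys_bumps {k : Int} (bs : List (Int × Int)) {X : PySem.Dict Int Int}
    (h : k ∈ X.keys) : k ∈ (pvBumps bs X).keys := by
  induction bs generalizing X with
  | nil => exact h
  | cons b bs ih => exact ih (pv_mem_keys_bump b h)

theorem pv_mem_keys_bumps_self {k : Int} (bs : List (Int × Int)) (X : PySem.Dict Int Int)
    (h : k ∈ bs.map (·.1)) : k ∈ (pvBumps bs X).keys := by
  induction bs generalizing X with
  | nil => simp at h
  | cons b bs ih =>
    simp only [List.map_cons, List.mem_cons] at h
    rcases h with h | h
    · subst h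
      exact pv_mem_keys_bumps bs (by
        unfold pvBump; rw [PySem.Dict.mem_keys_insert]; exact Or.inl rfl)
    · exact ih _ h

-- two single inserts commute when the second-inserted key was already present
theorem pv_insert_comm (X : PySem.Dict Int Int) {k k' : Int} (v v' : Int)
    (hne : k ≠ k') (hc : X.contains k = true) :
    (X.insert k' v').insert k v = (X.insert k v).insert k' v' := by
  have hck : (X.insert k' v').contains k = true := by
    rw [PySem.Dict.contains_insert]; simp [hc]
  apply PySem.Dict.ext
  by_cases hc' : X.contains k' = true
  · have h1 : (X.insert k v).contains k' = true := by
      rw [PySem.Dict.contains_insert]; simp [hc']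
    rw [PySem.Dict.items_insert_of_contains _ _ hck,
        PySem.Dict.items_insert_of_contains _ _ hc',
        PySem.Dict.items_insert_of_contains _ _ h1,
        PySem.Dict.items_insert_of_contains _ _ hc,
        List.map_map, List.map_map]
    apply List.map_congr_left
    intro q _
    by_cases h1 : q.1 = k <;> by_cases h2 : q.1 = k' <;>
      simp [Function.comp, h1, h2, hne, Ne.symm hne]
  · have hc'' : X.contains k' = false := by simpa using hc'
    have h2 : (X.insert k v).contains k' = false := by
      rw [PySem.Dict.contains_insert]
      simp [hc'', Ne.symm hne]
    rw [PySem.Dict.items_insert_of_contains _ v hck,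
        PySem.Dict.items_insert_of_not_contains X v' hc'',
        PySem.Dict.items_insert_of_not_contains _ v' h2,
        PySem.Dict.items_insert_of_contains _ v hc,
        List.map_append]
    simp [Ne.symm hne]

-- bumps commute when one key is already present
theorem pv_bump_comm {p q : Int × Int} {X : PySem.Dict Int Int}
    (h : p.1 ∈ X.keys) : pvBump (pvBump X q) p = pvBump (pvBump X p) q := by
  have hc : X.contains p.1 = true := (PySem.Dict.contains_iff_mem_keys X p.1).2 h
  by_cases he : p.1 = q.1
  · unfold pvBump
    rw [← he, PySem.Dict.getD_insert_self, PySem.Dict.getD_insert_self,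
        PySem.Dict.insert_insert_self, PySem.Dict.insert_insert_self]
    congr 1
    ring
  · unfold pvBump
    rw [PySem.Dict.getD_insert_of_ne X _ _ he, PySem.Dict.getD_insert_of_ne X _ _ (Ne.symm he)]
    exact pv_insert_comm X _ _ he hc

-- a bump of a present key moves out of a bump fold
theorem pv_bump_bumps {p : Int × Int} (bs : List (Int × Int)) {X : PySem.Dict Int Int}
    (h : p.1 ∈ X.keys) : pvBumps bs (pvBump X p) = pvBump (pvBumps bs X) p := by
  induction bs generalizing X with
  | nil => rfl
  | cons b bs ih =>
    show pvBumps bs (pvBump (pvBump X p) b) = _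
    rw [← pv_bump_comm h, ih (pv_mem_keys_bump b h)]
    rfl

-- two bump folds commute when the keys of one are all present
theorem pv_bumps_comm (as bs : List (Int × Int)) (X : PySem.Dict Int Int)
    (h : ∀ p ∈ as, p.1 ∈ X.keys) :
    pvBumps bs (pvBumps as X) = pvBumps as (pvBumps bs X) := by
  induction as generalizing X with
  | nil => rfl
  | cons a as ih =>
    show pvBumps bs (pvBumps as (pvBump X a)) = pvBumps as (pvBump (pvBumps bs X) a)
    rw [ih _ (fun p hp => pv_mem_keys_bump a (h p (List.mem_cons_of_mem a hp)))]
    rw [pv_bump_bumps bs (h a (List.mem_cons_self ..))]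

-- bump-by-(c+1) = bump-by-c then bump-by-1, over a whole factor list
theorem pv_split_bump (F : List Int) (c : Int) (X : PySem.Dict Int Int) :
    pvBumps (F.map (fun f => (f, c + 1))) X =
      pvBumps (F.map (fun f => (f, (1 : Int)))) (pvBumps (F.map (fun f => (f, c))) X) := by
  induction F generalizing X with
  | nil => rfl
  | cons f F ih =>
    show pvBumps (F.map _) (pvBump X (f, c + 1)) =
      pvBumps (F.map _) (pvBump (pvBumps (F.map _) (pvBump X (f, c))) (f, 1))
    rw [← pv_bump_bumps (F.map (fun f => (f, c)))
      (show (f, (1:Int)).1 ∈ (pvBump X (f, c)).keys by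
        unfold pvBump; rw [PySem.Dict.mem_keys_insert]; exact Or.inl rfl)]
    have hb : pvBump (pvBump X (f, c)) (f, 1) = pvBump X (f, c + 1) := by
      unfold pvBump
      simp only
      rw [PySem.Dict.getD_insert_self, PySem.Dict.insert_insert_self]
      ring_nf
    rw [hb, ih]

theorem pv_mem_keys_step2 {k : Int} {Y : PySem.Dict Int Int} (q : Int × Int)
    (h : k ∈ Y.keys) : k ∈ (pvStep2 Y q).keys :=
  pv_mem_keys_bumps _ h

-- a step1 on present keys moves out of a step2 fold
theorem pv_step1_out (post : List (Int × Int)) (d : Int) :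
    ∀ (Y : PySem.Dict Int Int), (∀ f ∈ pvFacs d, f ∈ Y.keys) →
      post.foldl pvStep2 (pvStep1 Y d) = pvStep1 (post.foldl pvStep2 Y) d := by
  induction post with
  | nil => intro Y _; rfl
  | cons q post ih =>
    intro Y h
    show post.foldl pvStep2 (pvStep2 (pvStep1 Y d) q) = _
    have hcomm : pvStep2 (pvStep1 Y d) q = pvStep1 (pvStep2 Y q) d := by
      unfold pvStep1 pvStep2
      exact pv_bumps_comm _ _ Y (by
        intro p hp
        simp only [List.mem_map] at hp
        obtain ⟨f, hf, rfl⟩ := hp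
        exact h f hf)
    rw [hcomm, ih (pvStep2 Y q) (fun f hf => pv_mem_keys_step2 q (h f hf))]
    rfl

-- keys stay nodup through the counting loop
theorem pv_nodup_count (L : List Int) :
    ∀ (X : PySem.Dict Int Int), X.keys.Nodup → (L.foldl pvCStep X).keys.Nodup := by
  induction L with
  | nil => intro X h; exact h
  | cons d L ih =>
    intro X h
    refine ih _ ?_
    unfold pvCStep
    split
    · exact PySem.Dict.nodup_keys_insert _ _ _ h
    · exact h

-- MAIN: processing the diffs one by one equals processing the counter's items weighted
theorem pv_main (L : List Int) :
    L.foldl pvStep1 PySem.Dict.empty =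
      ((L.foldl pvCStep PySem.Dict.empty).items).foldl pvStep2 PySem.Dict.empty := by
  induction L using List.reverseRecOn with
  | nil => rfl
  | append_singleton L d ih =>
    rw [List.foldl_append, List.foldl_append]
    simp only [List.foldl_cons, List.foldl_nil]
    set C := L.foldl pvCStep PySem.Dict.empty with hC
    have hnd : C.keys.Nodup := pv_nodup_count L PySem.Dict.empty PySem.Dict.nodup_keys_empty
    by_cases h2 : 2 ≤ d
    · by_cases hc : C.contains d = true
      · -- d already counted: its factors are bumped in place
        have hmem : d ∈ C.keys := (PySem.Dict.contains_iff_mem_keys C d).1 hc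
        simp only [PySem.Dict.keys] at hmem
        obtain ⟨q, hq, hq1⟩ := List.mem_map.1 hmem
        obtain ⟨qk, c⟩ := q
        simp only at hq1
        rw [hq1] at hq
        obtain ⟨pre, post, hsplit⟩ := List.append_of_mem hq
        have hnd2 : (d :: (pre.map (fun p => p.1) ++ post.map (fun p => p.1))).Nodup := by
          have h0 := hnd
          simp only [PySem.Dict.keys, hsplit, List.map_append, List.map_cons] at h0
          rw [List.nodup_middle] at h0
          exact h0
        have hnotin : d ∉ pre.map (fun p => p.1) ++ post.map (fun p => p.1) :=
          (List.nodup_cons.1 hnd2).1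
        have hdpre : ∀ p ∈ pre, p.1 ≠ d := by
          intro p hp hpd
          exact hnotin (List.mem_append_left _ (List.mem_map.2 ⟨p, hp, hpd⟩))
        have hdpost : ∀ p ∈ post, p.1 ≠ d := by
          intro p hp hpd
          exact hnotin (List.mem_append_right _ (List.mem_map.2 ⟨p, hp, hpd⟩))
        have hgd : C.getD d 0 = c :=
          PySem.Dict.getD_of_mem_items C (hsplit ▸ hq) hnd 0
        have hpreid : pre.map (fun p => if p.1 == d then (d, c + 1) else p) = pre := by
          rw [List.map_congr_left (g := id) (fun p hp => by simp [hdpre p hp])]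
          exact List.map_id pre
        have hpostid : post.map (fun p => if p.1 == d then (d, c + 1) else p) = post := by
          rw [List.map_congr_left (g := id) (fun p hp => by simp [hdpost p hp])]
          exact List.map_id post
        have hitems : (pvCStep C d).items = pre ++ (d, c + 1) :: post := by
          rw [show pvCStep C d = C.insert d (C.getD d 0 + 1) from if_pos h2, hgd,
              PySem.Dict.items_insert_of_contains _ _ hc, hsplit, List.map_append,
              List.map_cons, hpreid, hpostid]
          simp
        rw [hitems, ih, hsplit]
        rw [List.foldl_append, List.foldl_append, List.foldl_cons, List.foldl_cons]
        have hsplitbump : pvStep2 (pre.foldl pvStep2 PySem.Dict.empty) (d, c + 1)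
            = pvStep1 (pvStep2 (pre.foldl pvStep2 PySem.Dict.empty) (d, c)) d := by
          unfold pvStep1 pvStep2
          exact pv_split_bump (pvFacs d) c _
        rw [hsplitbump]
        exact (pv_step1_out post d (pvStep2 (List.foldl pvStep2 PySem.Dict.empty pre) (d, c))
          (fun f hf => by
            show f ∈ (pvBumps ((pvFacs d).map (fun f => (f, c))) _).keys
            exact pv_mem_keys_bumps_self _ _ (by
              simpa [List.map_map, Function.comp] using hf))).symm
      · -- new difference: appended with count 1
        rw [show pvCStep C d = C.insert d (C.getD d 0 + 1) from if_pos h2]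
        rw [PySem.Dict.getD_of_not_contains _ _ (by simpa using hc)]
        rw [PySem.Dict.items_insert_of_not_contains _ _ (by simpa using hc)]
        rw [List.foldl_append]
        simp only [List.foldl_cons, List.foldl_nil]
        rw [← ih]
        rfl
    · rw [pvStep1_of_lt _ (by omega), show pvCStep C d = C from if_neg h2]
      exact ih

-- A's double loop produces the fold of pvStep1 over the diffs
theorem pv_A_loop (xs : List Int) : ∀ (m k : Nat) (ff : PySem.Dict Int Int), xs.length ≤ k + m →
    (PySem.List.pyRange (k : Int) (PySem.List.len xs - 1)).foldl (fun ff i =>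
      (PySem.List.pyRange (i + 1) (PySem.List.len xs)).foldl (fun ff j =>
        (PySem.List.pyRange 2 (PySem.List.pyGetD xs j 0 - PySem.List.pyGetD xs i 0 + 1)).foldl
          (fun ff f =>
            if PySem.Int.mod (PySem.List.pyGetD xs j 0 - PySem.List.pyGetD xs i 0) f == 0 then
              ff.modify f 0 (· + 1) else ff) ff) ff) ff
      = (pvDiffs (xs.drop k)).foldl pvStep1 ff := by
  intro m
  induction m with
  | zero =>
    intro k ff h
    rw [PySem.List.pyRange_one_eq_nil (by
      simp only [PySem.List.len]; omega)]
    rw [List.drop_eq_nil_of_le (by omega)]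
    rfl
  | succ m ih =>
    intro k ff h
    by_cases hk : k + 1 < xs.length
    · have hk0 : k < xs.length := by omega
      rw [PySem.List.pyRange_one_cons (by simp only [PySem.List.len]; omega)]
      rw [List.foldl_cons]
      rw [PySem.List.foldl_pyRange_pyGetD xs 0
        (fun ff y =>
          (PySem.List.pyRange 2 (y - PySem.List.pyGetD xs (k : Int) 0 + 1)).foldl
            (fun ff f =>
              if PySem.Int.mod (y - PySem.List.pyGetD xs (k : Int) 0) f == 0 then
                ff.modify f 0 (· + 1) else ff) ff) ff (by positivity)]
      have hto : ((k : Int) + 1).toNat = k + 1 := by omega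
      rw [hto]
      have hget : PySem.List.pyGetD xs (k : Int) 0 = xs[k] := by
        rw [PySem.List.pyGetD_eq_getElem xs 0 (by positivity) (by exact_mod_cast hk0)]
        simp
      have hdrop : xs.drop k = xs[k] :: xs.drop (k + 1) := List.drop_eq_getElem_cons hk0
      rw [hdrop]
      show _ = ((xs.drop (k + 1)).map (· - xs[k]) ++ pvDiffs (xs.drop (k + 1))).foldl pvStep1 ff
      rw [List.foldl_append, List.foldl_map]
      have hcast : (k : Int) + 1 = ((k + 1 : Nat) : Int) := by push_cast; ring
      rw [hcast] at *
      rw [ih (k + 1) _ (by omega)]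
      congr 1
      have hbody : ∀ (ff : PySem.Dict Int Int) (y : Int),
          (PySem.List.pyRange 2 (y - PySem.List.pyGetD xs ((k : Nat) : Int) 0 + 1)).foldl
            (fun ff f =>
              if PySem.Int.mod (y - PySem.List.pyGetD xs ((k : Nat) : Int) 0) f == 0 then
                ff.modify f 0 (· + 1) else ff) ff = pvStep1 ff (y - xs[k]) := by
        intro ff y
        rw [hget]
        exact pv_stepA_eq ff (y - xs[k])
      exact List.foldl_ext _ _ ff (fun a b _ => hbody a b)
    · rw [PySem.List.pyRange_one_eq_nil (by simp only [PySem.List.len]; omega)]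
      rw [pvDiffs_short (by
        rw [List.length_drop]
        omega)]
      rfl

-- B's counting double loop produces the fold of pvCStep over the diffs
theorem pv_B_loop (xs : List Int) : ∀ (m k : Nat) (dc : PySem.Dict Int Int), xs.length ≤ k + m →
    (PySem.List.enumerate (xs.drop k) (k : Int)).foldl (fun dc p =>
      (PySem.List.slice xs (some (p.1 + 1))).foldl (fun dc y =>
        if 2 ≤ y - p.2 then dc.insert (y - p.2) (dc.getD (y - p.2) 0 + 1) else dc) dc) dc
      = (pvDiffs (xs.drop k)).foldl pvCStep dc := by
  intro m
  induction m with
  | zero =>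
    intro k dc h
    rw [List.drop_eq_nil_of_le (by omega)]
    rfl
  | succ m ih =>
    intro k dc h
    by_cases hk0 : k < xs.length
    · have hdrop : xs.drop k = xs[k] :: xs.drop (k + 1) := List.drop_eq_getElem_cons hk0
      rw [hdrop, PySem.List.enumerate_cons, List.foldl_cons]
      rw [PySem.List.slice_from xs (a := (k : Int) + 1) (by positivity)]
      have hto : ((k : Int) + 1).toNat = k + 1 := by omega
      rw [hto]
      show _ = ((xs.drop (k + 1)).map (· - xs[k]) ++ pvDiffs (xs.drop (k + 1))).foldl pvCStep dc
      rw [List.foldl_append, List.foldl_map]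
      have hcast : (k : Int) + 1 = ((k + 1 : Nat) : Int) := by push_cast; ring
      rw [hcast]
      exact ih (k + 1) _ (by omega)
    · rw [List.drop_eq_nil_of_le (by omega)]
      rfl

-- ===== VERDICT (by name: the statement is the Claim_ definition above) =====
theorem calcfactors_spec : Claim_equal_calcfactors := by
  intro repts _
  show calcfactors repts = calcfactors_alt repts
  have hA := pv_A_loop repts repts.length 0 PySem.Dict.empty (by omega)
  have hB := pv_B_loop repts repts.length 0 PySem.Dict.empty (by omega)
  simp only [Nat.cast_zero, List.drop_zero] at hA hB
  have hAeq : calcfactors repts = ((pvDiffs repts).foldl pvStep1 PySem.Dict.empty).items :=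
    congrArg (fun X : PySem.Dict Int Int => X.items) hA
  have hBeq : calcfactors_alt repts =
      (((pvDiffs repts).foldl pvCStep PySem.Dict.empty).items.foldl pvStep2
        PySem.Dict.empty).items := by
    have h1 : calcfactors_alt repts
        = (((pvDiffs repts).foldl pvCStep PySem.Dict.empty).items.foldl (fun ff p =>
            (PySem.List.pyRange 2 (p.1 + 1)).foldl (fun ff f =>
              if PySem.Int.mod p.1 f == 0 then ff.insert f (ff.getD f 0 + p.2) else ff) ff)
          PySem.Dict.empty).items :=
      congrArg (fun C : PySem.Dict Int Int => ((C.items.foldl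
        (fun (ff : PySem.Dict Int Int) (p : Int × Int) =>
          (PySem.List.pyRange 2 (p.1 + 1)).foldl (fun (ff : PySem.Dict Int Int) (f : Int) =>
            if PySem.Int.mod p.1 f == 0 then ff.insert f (ff.getD f 0 + p.2) else ff) ff)
        PySem.Dict.empty).items)) hB
    rw [h1]
    congr 1
    exact List.foldl_ext _ _ _ (fun a b _ => pv_stepB_eq a b)
  rw [hAeq, hBeq, pv_main]
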